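-- pv_equiv track=rewrite | github.com/sparsh-kamat/aiLab | nqueens.py | min_conflict_col
-- ===== SOURCE A (Python) =====
-- def conflicts(state, row, col):
--     # count the number of conflicts
--     count = 0
--     for i in range(len(state)):
--         if i != row:  # makes sure we are not checking conflicts in the same row
--             if state[i] == col or abs(i - row) == abs(state[i] - col):  # horiz, vert, diag
--                 count += 1
--     return count
--
-- def min_conflict_col(state, row):
--     """Find the column with the minimum conflicts for a queen in a given row."""
--     min_conflicts = float("inf")
--     min_col = -1
--     for col in range(8):
--         conflict_count = conflicts(state, row, col)
--         if conflict_count < min_conflicts: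
--             min_conflicts = conflict_count
--             min_col = col
--     return min_col
-- ===== SOURCE B (Python) =====
-- def min_conflict_col(state, row):
--     """Find the column with the minimum conflicts for a queen in a given row."""
--     # One pass: a queen at (i, state[i]) with i != row attacks exactly the three
--     # distinct columns state[i], state[i]-(i-row), state[i]+(i-row) in `row`.
--     counts = {}
--     for i, c in enumerate(state):
--         if i != row:
--             d = i - row
--             for k in (c, c - d, c + d):
--                 counts[k] = counts.get(k, 0) + 1
--     best_count = None
--     best_col = -1
--     for col in range(8):
--         cc = counts.get(col, 0)
--         if best_count is None or cc < best_count: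
--             best_count = cc
--             best_col = col
--     return best_col
-- ===== Notes on version B (the rewrite author's own statement) =====
-- stated objective: alternative
-- what changed: Instead of rescanning the whole board once per candidate column (8 full passes calling conflicts), B makes a single pass over state building a hash table of attacked-column tallies (each off-row queen attacks exactly three distinct columns in the row), then picks the first column of 0..7 with the strictly smallest tally from O(1) lookups.
import Mathlib
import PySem

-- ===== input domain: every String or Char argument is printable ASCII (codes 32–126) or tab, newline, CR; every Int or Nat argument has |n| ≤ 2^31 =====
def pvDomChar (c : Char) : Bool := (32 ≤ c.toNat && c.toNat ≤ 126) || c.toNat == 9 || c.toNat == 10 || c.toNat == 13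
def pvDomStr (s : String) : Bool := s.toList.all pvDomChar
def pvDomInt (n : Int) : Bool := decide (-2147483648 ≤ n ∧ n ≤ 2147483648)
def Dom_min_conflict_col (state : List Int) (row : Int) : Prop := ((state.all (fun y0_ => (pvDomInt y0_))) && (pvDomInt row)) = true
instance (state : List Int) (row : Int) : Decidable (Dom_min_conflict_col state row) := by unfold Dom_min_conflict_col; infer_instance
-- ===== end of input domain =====

-- B replaces A's 8 full board scans by one tally-building pass plus 8 O(1) lookups (a different, single-pass algorithm of similar cost).


-- ===== PORT A =====
-- helper `conflicts`: counts queens attacking square (row, col); the index i from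
-- range(len(state)) is always in range, so state[i] is exact via pyGetD.
def conflicts (state : List Int) (row : Int) (col : Int) : Int :=
  (PySem.List.pyRange 0 (state.length : Int) 1).foldl
    (fun count i =>
      if i ≠ row then
        if PySem.List.pyGetD state i 0 == col
            || (i - row).natAbs == (PySem.List.pyGetD state i 0 - col).natAbs
        then count + 1 else count
      else count) 0

-- float("inf") initial minimum modelled as `none` (any int compares below it).
def min_conflict_col (state : List Int) (row : Int) : Int :=
  ((PySem.List.pyRange 0 8 1).foldl
    (fun (acc : Option Int × Int) col =>
      let conflict_count := conflicts state row col
      match acc.1 with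
      | none => (some conflict_count, col)
      | some m => if conflict_count < m then (some conflict_count, col) else acc)
    (none, -1)).2

-- ===== PORT B =====
def min_conflict_col_alt (state : List Int) (row : Int) : Int :=
  let counts : PySem.Dict Int Int :=
    (PySem.List.enumerate state).foldl
      (fun d ic =>
        if ic.1 ≠ row then
          [ic.2, ic.2 - (ic.1 - row), ic.2 + (ic.1 - row)].foldl
            (fun d k => d.insert k (d.getD k 0 + 1)) d
        else d)
      PySem.Dict.empty
  ((PySem.List.pyRange 0 8 1).foldl
    (fun (acc : Option Int × Int) col =>
      let cc := counts.getD col 0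
      match acc.1 with
      | none => (some cc, col)
      | some m => if cc < m then (some cc, col) else acc)
    (none, -1)).2

-- ===== PRECONDITION & SPEC =====
def Spec_min_conflict_col (state : List Int) (row : Int) (out : Int) : Prop := out = min_conflict_col_alt state row
instance (state : List Int) (row : Int) (out : Int) : Decidable (Spec_min_conflict_col state row out) := by unfold Spec_min_conflict_col; infer_instance

-- ===== CLAIM (what is proved, stated in full; the proofs are below) =====
def Claim_equal_min_conflict_col : Prop := ∀ (state : List Int) (row : Int), Dom_min_conflict_col state row → Spec_min_conflict_col state row (min_conflict_col state row)

-- ===== LEMMAS AND PROOFS =====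

-- A's per-index step, phrased on an (index, value) pair.
def pvAstep (row col : Int) (count : Int) (ic : Int × Int) : Int :=
  if ic.1 ≠ row then
    if ic.2 == col || (ic.1 - row).natAbs == (ic.2 - col).natAbs
    then count + 1 else count
  else count

-- B's per-index step (the tally update).
def pvBstep (row : Int) (d : PySem.Dict Int Int) (ic : Int × Int) : PySem.Dict Int Int :=
  if ic.1 ≠ row then
    [ic.2, ic.2 - (ic.1 - row), ic.2 + (ic.1 - row)].foldl
      (fun d k => d.insert k (d.getD k 0 + 1)) d
  else d

-- one step of B's tally changes the col entry exactly as one step of A's counter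
theorem pvStep_eq (row col : Int) (ic : Int × Int) (d : PySem.Dict Int Int) :
    (pvBstep row d ic).getD col 0 = pvAstep row col (d.getD col 0) ic := by
  obtain ⟨i, c⟩ := ic
  unfold pvBstep pvAstep
  by_cases h : i = row
  · simp [h]
  · simp only [h, ne_eq, not_false_iff, if_pos]
    rw [PySem.Dict.getD_foldl_insert_add_one]
    simp only [List.count_cons, List.count_nil]
    by_cases h1 : c = col <;> by_cases h2 : (i - row).natAbs = (c - col).natAbs <;>
      simp [h1, h2] <;> omega

theorem pvFold_eq (row col : Int) (l : List (Int × Int)) (d : PySem.Dict Int Int) :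
    (l.foldl (pvBstep row) d).getD col 0 = l.foldl (pvAstep row col) (d.getD col 0) := by
  induction l generalizing d with
  | nil => rfl
  | cons ic l ih => simp only [List.foldl_cons, ih, pvStep_eq]

-- A's conflicts is the fold of pvAstep over enumerate(state)
theorem pvConflicts_eq (state : List Int) (row col : Int) :
    conflicts state row col
      = (PySem.List.enumerate state).foldl (pvAstep row col) 0 := by
  rw [PySem.List.enumerate_eq_map_pyRange state 0, List.foldl_map]
  rfl

theorem pvCounts_eq (state : List Int) (row col : Int) :
    ((PySem.List.enumerate state).foldl
      (fun d (ic : Int × Int) =>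
        if ic.1 ≠ row then
          [ic.2, ic.2 - (ic.1 - row), ic.2 + (ic.1 - row)].foldl
            (fun d k => d.insert k (d.getD k 0 + 1)) d
        else d)
      PySem.Dict.empty).getD col 0 = conflicts state row col := by
  rw [pvConflicts_eq]
  exact pvFold_eq row col (PySem.List.enumerate state 0) PySem.Dict.empty

-- ===== VERDICT (by name: the statement is the Claim_ definition above) =====
theorem min_conflict_col_spec : Claim_equal_min_conflict_col := by
  intro state row _
  unfold Spec_min_conflict_col min_conflict_col min_conflict_col_alt
  congr 1
  apply PySem.List.foldl_congr_mem
  intro acc col _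
  simp only [pvCounts_eq]
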